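-- pv_equiv track=rewrite | github.com/itsnotthetim/FRA532_LAB1 | src/ackermann_controller/scripts/kinematics_validate.py | get_closest_index
-- ===== SOURCE A (Python) =====
-- def get_closest_index(time_list, t):
--     """Return the index of the entry in time_list closest to time t."""
--     if not time_list:
--         return None
--     closest_index = 0
--     min_diff = abs(time_list[0] - t)
--     for i, time_val in enumerate(time_list):
--         diff = abs(time_val - t)
--         if diff < min_diff:
--             min_diff = diff
--             closest_index = i
--     return closest_index
-- ===== SOURCE B (Python) =====
-- def get_closest_index(time_list, t):
--     """Return the index of the entry in time_list closest to time t."""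
--     if not time_list:
--         return None
--     diffs = [abs(x - t) for x in time_list]
--     return diffs.index(min(diffs))
-- ===== Notes on version B (the rewrite author's own statement) =====
-- stated objective: simpler
-- what changed: Replaces A's single pass carrying a (best index, best diff) accumulator with staged passes: materialise the list of absolute differences, take its minimum with min(), then locate that value's first position with list.index(); the hinted bisect version was not used because A accepts unsorted lists and a sortedness precondition would exclude most ordinary inputs.
import Mathlib
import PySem

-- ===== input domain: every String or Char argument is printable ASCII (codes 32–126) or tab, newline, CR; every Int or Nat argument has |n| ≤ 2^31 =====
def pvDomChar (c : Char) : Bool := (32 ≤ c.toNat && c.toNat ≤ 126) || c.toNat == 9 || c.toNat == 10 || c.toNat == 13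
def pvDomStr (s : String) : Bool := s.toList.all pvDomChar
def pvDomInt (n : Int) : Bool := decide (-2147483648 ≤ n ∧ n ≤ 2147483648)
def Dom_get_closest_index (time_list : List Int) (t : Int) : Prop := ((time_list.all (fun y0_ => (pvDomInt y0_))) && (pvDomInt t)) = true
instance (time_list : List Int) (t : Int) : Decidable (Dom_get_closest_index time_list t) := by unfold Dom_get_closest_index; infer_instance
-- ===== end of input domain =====

-- B replaces A's single pass with a (best index, best diff) accumulator by staged passes:
-- build the list of absolute differences, take min(), then list.index() its first position;
-- objective: simpler.

-- ===== PORT A =====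
-- A: explicit loop over enumerate(time_list) keeping (closest_index, min_diff).
def get_closest_index (time_list : List Int) (t : Int) : Option Int :=
  match time_list with
  | [] => none
  | x :: _ =>
    let r := (PySem.List.enumerate time_list 0).foldl
      (fun (s : Int × Int) p => if |p.2 - t| < s.2 then (p.1, |p.2 - t|) else s)
      (0, |x - t|)
    some r.1

-- ===== PORT B =====
-- B: diffs = [abs(x - t) for x in time_list]; return diffs.index(min(diffs)).
def get_closest_index_alt (time_list : List Int) (t : Int) : Option Int :=
  match time_list with
  | [] => none
  | _ :: _ =>
    let diffs := time_list.map (fun x => |x - t|)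
    match PySem.List.min? diffs (fun d => d) with
    | none => none                           -- unreachable: diffs is nonempty
    | some m => (PySem.List.index? diffs m).map (fun n => (n : Int))

-- ===== PRECONDITION & SPEC =====
def Spec_get_closest_index (time_list : List Int) (t : Int) (out : Option Int) : Prop := out = get_closest_index_alt time_list t
instance (time_list : List Int) (t : Int) (out : Option Int) : Decidable (Spec_get_closest_index time_list t out) := by unfold Spec_get_closest_index; infer_instance

-- ===== CLAIM (what is proved, stated in full; the proofs are below) =====
def Claim_equal_get_closest_index : Prop := ∀ (time_list : List Int) (t : Int), Dom_get_closest_index time_list t → Spec_get_closest_index time_list t (get_closest_index time_list t)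

-- ===== LEMMAS AND PROOFS =====

-- Facts about the running minimum of absolute differences, foldl (fun m y => min m |y - t|) c l.

theorem pv_fmin_le_init (t : Int) :
    ∀ (l : List Int) (c : Int), l.foldl (fun m y => min m |y - t|) c ≤ c := by
  intro l
  induction l with
  | nil => intro c; exact le_refl c
  | cons z zs ih =>
    intro c
    rw [List.foldl_cons]
    have := ih (min c |z - t|)
    omega

theorem pv_fmin_le_mem (t : Int) :
    ∀ (l : List Int) (c a : Int), a ∈ l → l.foldl (fun m y => min m |y - t|) c ≤ |a - t| := by
  intro l
  induction l with
  | nil => intro c a h; cases h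
  | cons z zs ih =>
    intro c a ha
    rw [List.foldl_cons]
    rcases List.mem_cons.mp ha with rfl | htail
    · have := pv_fmin_le_init t zs (min c |a - t|)
      omega
    · exact ih (min c |z - t|) a htail

theorem pv_fmin_eq_of_all (t : Int) :
    ∀ (l : List Int) (c : Int), (∀ y ∈ l, c ≤ |y - t|) →
      l.foldl (fun m y => min m |y - t|) c = c := by
  intro l
  induction l with
  | nil => intro c _; rfl
  | cons z zs ih =>
    intro c hall
    rw [List.foldl_cons]
    have hz : c ≤ |z - t| := hall z (by simp)
    have hmz : min c |z - t| = c := by omega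
    rw [hmz]
    exact ih c (fun y hy => hall y (by simp [hy]))

theorem pv_fmin_mem (t : Int) :
    ∀ (l : List Int) (c : Int), l.foldl (fun m y => min m |y - t|) c < c →
      l.foldl (fun m y => min m |y - t|) c ∈ l.map (fun y => |y - t|) := by
  intro l
  induction l with
  | nil => intro c h; simp at h
  | cons z zs ih =>
    intro c hlt
    rw [List.foldl_cons] at hlt ⊢
    rw [List.map_cons]
    by_cases hz : |z - t| < c
    · have hmz : min c |z - t| = |z - t| := by omega
      rw [hmz] at *
      by_cases h2 : zs.foldl (fun m y => min m |y - t|) |z - t| < |z - t|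
      · exact List.mem_cons_of_mem _ (ih _ h2)
      · have hle := pv_fmin_le_init t zs |z - t|
        have heq : zs.foldl (fun m y => min m |y - t|) |z - t| = |z - t| := by omega
        rw [heq]
        simp
    · have hmz : min c |z - t| = c := by omega
      rw [hmz] at hlt ⊢
      exact List.mem_cons_of_mem _ (ih c hlt)

-- first-occurrence index: idxOf? of a member is some of its idxOf
theorem pv_idxOf?_of_mem {a : Int} :
    ∀ (l : List Int), a ∈ l → l.idxOf? a = some (l.idxOf a) := by
  intro l
  induction l with
  | nil => intro h; cases h
  | cons z zs ih =>
    intro hmem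
    rw [List.idxOf?_cons, List.idxOf_cons]
    by_cases hz : z = a
    · simp [hz]
    · have hb : (z == a) = false := by simp [hz]
      rw [hb]
      simp only [Bool.false_eq_true, if_false, cond_false]
      have : a ∈ zs := by rcases List.mem_cons.mp hmem with h | h; exact absurd h.symm hz; exact h
      rw [ih this]
      rfl

-- A's running-minimum fold over `enumerate ds k` started at state (j, d): if no element of ds
-- beats d the state survives; otherwise the result is the overall minimum m = foldl min d ds
-- together with k + (index of m's first occurrence in ds's diff list).
theorem pv_foldA_char (t : Int) :
    ∀ (ds : List Int) (k : Nat) (j d : Int),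
      (PySem.List.enumerate ds (k : Int)).foldl
          (fun (s : Int × Int) p => if |p.2 - t| < s.2 then (p.1, |p.2 - t|) else s) (j, d)
        = if ∀ y ∈ ds, d ≤ |y - t| then (j, d)
          else ((k : Int) + (ds.map (fun x => |x - t|)).idxOf (ds.foldl (fun m x => min m |x - t|) d),
                ds.foldl (fun m x => min m |x - t|) d) := by
  intro ds
  induction ds with
  | nil => intro k j d; simp [PySem.List.enumerate]
  | cons x rest ih =>
    intro k j d
    rw [PySem.List.enumerate_cons, List.foldl_cons]
    have hcast : ((k : Int) + 1) = ((k + 1 : Nat) : Int) := by push_cast; ring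
    by_cases hx : |x - t| < d
    · rw [if_pos hx, hcast, ih (k + 1) (k : Int) |x - t|]
      have hne : ¬ ∀ y ∈ x :: rest, d ≤ |y - t| := by
        intro h; exact absurd (h x (by simp)) (by omega)
      rw [if_neg hne]
      have hfold : (x :: rest).foldl (fun m y => min m |y - t|) d
          = rest.foldl (fun m y => min m |y - t|) |x - t| := by
        rw [List.foldl_cons]
        have : min d |x - t| = |x - t| := by omega
        rw [this]
      by_cases hall : ∀ y ∈ rest, |x - t| ≤ |y - t|
      · rw [if_pos hall, hfold, pv_fmin_eq_of_all t rest |x - t| hall]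
        rw [List.map_cons, List.idxOf_cons]
        simp
      · rw [if_neg hall, hfold]
        obtain ⟨y, hy, hylt⟩ : ∃ y ∈ rest, |y - t| < |x - t| := by
          by_contra h
          exact hall (fun y hy => by by_contra h2; exact h ⟨y, hy, by omega⟩)
        have hmlt : rest.foldl (fun m y => min m |y - t|) |x - t| < |x - t| := by
          have := pv_fmin_le_mem t rest |x - t| y hy
          omega
        have hne2 : ¬ (|x - t| = rest.foldl (fun m y => min m |y - t|) |x - t|) := by omega
        rw [List.map_cons, List.idxOf_cons]
        have hb : (|x - t| == rest.foldl (fun m y => min m |y - t|) |x - t|) = false := by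
          simp [hne2]
        rw [hb]
        simp only [cond_false, Prod.mk.injEq]
        exact ⟨by push_cast; ring, trivial⟩
    · rw [if_neg hx, hcast, ih (k + 1) j d]
      by_cases hall : ∀ y ∈ rest, d ≤ |y - t|
      · rw [if_pos hall, if_pos]
        intro y hy
        rcases List.mem_cons.mp hy with rfl | htail
        · omega
        · exact hall y htail
      · rw [if_neg hall]
        have hne : ¬ ∀ y ∈ x :: rest, d ≤ |y - t| := by
          intro h; exact hall (fun y hy => h y (by simp [hy]))
        rw [if_neg hne]
        have hfold : (x :: rest).foldl (fun m y => min m |y - t|) d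
            = rest.foldl (fun m y => min m |y - t|) d := by
          rw [List.foldl_cons]
          have : min d |x - t| = d := by omega
          rw [this]
        rw [hfold]
        obtain ⟨y, hy, hylt⟩ : ∃ y ∈ rest, |y - t| < d := by
          by_contra h
          exact hall (fun y hy => by by_contra h2; exact h ⟨y, hy, by omega⟩)
        have hmlt : rest.foldl (fun m y => min m |y - t|) d < d := by
          have := pv_fmin_le_mem t rest d y hy
          omega
        have hne2 : ¬ (|x - t| = rest.foldl (fun m y => min m |y - t|) d) := by omega
        rw [List.map_cons, List.idxOf_cons]
        have hb : (|x - t| == rest.foldl (fun m y => min m |y - t|) d) = false := by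
          simp [hne2]
        rw [hb]
        simp only [cond_false, Prod.mk.injEq]
        exact ⟨by push_cast; ring, trivial⟩

-- ===== VERDICT (by name: the statement is the Claim_ definition above) =====
theorem get_closest_index_spec : Claim_equal_get_closest_index := by
  intro time_list t _
  unfold Spec_get_closest_index
  match time_list with
  | [] => rfl
  | x :: xs =>
    unfold get_closest_index get_closest_index_alt
    simp only [List.map_cons]
    rw [PySem.List.min?_id_cons]
    -- A's fold: the first step (index 0, x itself) never improves on (0, |x - t|)
    rw [PySem.List.enumerate_cons, List.foldl_cons]
    simp only [lt_irrefl, if_false]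
    rw [show (0 : Int) + 1 = ((1 : Nat) : Int) by norm_num]
    rw [pv_foldA_char t xs 1 0 |x - t|]
    rw [PySem.List.index?_eq_idxOf?]
    have hfold_eq : (xs.map (fun y => |y - t|)).foldl min |x - t|
        = xs.foldl (fun m y => min m |y - t|) |x - t| := by
      rw [List.foldl_map]
    rw [hfold_eq]
    by_cases hall : ∀ y ∈ xs, |x - t| ≤ |y - t|
    · rw [if_pos hall, pv_fmin_eq_of_all t xs |x - t| hall]
      rw [List.idxOf?_cons]
      simp
    · rw [if_neg hall]
      obtain ⟨y, hy, hylt⟩ : ∃ y ∈ xs, |y - t| < |x - t| := by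
        by_contra h
        exact hall (fun y hy => by by_contra h2; exact h ⟨y, hy, by omega⟩)
      have hmlt : xs.foldl (fun m y => min m |y - t|) |x - t| < |x - t| := by
        have := pv_fmin_le_mem t xs |x - t| y hy
        omega
      have hmem : xs.foldl (fun m y => min m |y - t|) |x - t| ∈ xs.map (fun y => |y - t|) :=
        pv_fmin_mem t xs |x - t| hmlt
      have hne : ¬ (|x - t| = xs.foldl (fun m y => min m |y - t|) |x - t|) := by omega
      rw [List.idxOf?_cons]
      have hb : (|x - t| == xs.foldl (fun m y => min m |y - t|) |x - t|) = false := by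
        simp [hne]
      rw [hb]
      simp only [Bool.false_eq_true, if_false]
      rw [pv_idxOf?_of_mem _ hmem]
      simp only [Option.map_some, Option.bind_eq_bind, Option.bind_some, Option.pure_def, Option.some.injEq]
      push_cast
      ring
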